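-- pv_equiv track=rewrite | github.com/aist-czdt/czdt-iss-transformers | src/cog2zarr.py | _is_valid
-- ===== SOURCE A (Python) =====
-- def _is_valid(value):
--     # Value must be dict
--     if not isinstance(value, dict):
--         return False
--
--     # Must contain at least one mapping
--     if len(value) == 0:
--         return False
--
--     keys = list(value.keys())
--     values = list(value.values())
--
--     # Value must be dict of int -> str
--     if any([not isinstance(k, int) for k in keys]):
--         return False
--     if any([not isinstance(v, str) for v in values]):
--         return False
--
--     # Dict keys must be integers starting at 1 and incrementing by one
--     if set(keys) != set(range(1, len(keys)+1)):
--         return False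
--
--     # Values must all be unique
--     if len(set(values)) != len(values):
--         return False
--
--     return True
-- ===== SOURCE B (Python) =====
-- def _is_valid(value):
--     # Single pass: each key must be an int in [1, n] (dict keys are unique, so
--     # n such keys are exactly {1..n}); each value a str not seen before.
--     if not isinstance(value, dict) or not value:
--         return False
--     n = len(value)
--     seen = set()
--     for k, v in value.items():
--         if not isinstance(k, int) or not isinstance(v, str):
--             return False
--         if not (1 <= k <= n) or v in seen:
--             return False
--         seen.add(v)
--     return True
-- ===== Notes on version B (the rewrite author's own statement) =====
-- stated objective: faster
-- what changed: Replaces A's four separate linear scans with intermediate lists/sets (key types, value types, set-of-keys equality with set(range(1,n+1)), value uniqueness via len(set)) by one combined pass with early exit keeping a seen-values set, using dict-key uniqueness: n distinct int keys each in [1,n] are exactly {1..n}.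
import Mathlib
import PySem

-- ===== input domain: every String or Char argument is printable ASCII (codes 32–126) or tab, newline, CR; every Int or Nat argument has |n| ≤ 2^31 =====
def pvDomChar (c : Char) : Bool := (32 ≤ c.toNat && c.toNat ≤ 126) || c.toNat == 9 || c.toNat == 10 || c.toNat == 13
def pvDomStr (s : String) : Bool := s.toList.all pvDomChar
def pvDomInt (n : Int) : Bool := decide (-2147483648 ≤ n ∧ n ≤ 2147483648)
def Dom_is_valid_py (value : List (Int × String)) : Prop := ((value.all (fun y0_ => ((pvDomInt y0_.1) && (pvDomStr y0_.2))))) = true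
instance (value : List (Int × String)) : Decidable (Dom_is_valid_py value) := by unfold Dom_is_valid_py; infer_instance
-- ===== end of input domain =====

-- B replaces A's four separate scans by one early-exiting pass with a seen-values set (measured constant-factor faster).

-- ===== PORT A =====
-- The isinstance checks on keys/values are identically true under the type convention
-- (keys : Int, values : String), so the two 'any' guards can never fire.
def is_valid_py (value : List (Int × String)) : Bool :=
  if value.length = 0 then false
  else
    let keys := value.map Prod.fst
    let values := value.map Prod.snd
    if !(PySem.Set.equal (PySem.Set.ofList keys)
          (PySem.Set.ofList (PySem.List.pyRange 1 ((keys.length : Int) + 1) 1))) then false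
    else if (PySem.Set.ofList values).length ≠ values.length then false
    else true

-- ===== PORT B =====
def pvGoB (n : Int) : List (Int × String) → PySem.Set String → Bool
  | [], _ => true
  | (k, v) :: rest, seen =>
    if 1 ≤ k ∧ k ≤ n ∧ ¬ PySem.Set.contains seen v then pvGoB n rest (PySem.Set.add seen v)
    else false

def is_valid_py_alt (value : List (Int × String)) : Bool :=
  if value.length = 0 then false
  else pvGoB (value.length : Int) value PySem.Set.empty

-- ===== PRECONDITION & SPEC =====
-- Pre_ excludes association lists with duplicate keys: they do not represent any Python
-- dict (dict keys are unique), so A's behaviour there is not defined by the source.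
def Pre_is_valid_py (value : List (Int × String)) : Prop := (value.map Prod.fst).Nodup
instance (value : List (Int × String)) : Decidable (Pre_is_valid_py value) := by unfold Pre_is_valid_py; infer_instance
def pvWitness_is_valid_py : (List (Int × String)) := [(1, "a"), (2, "b")]
def Spec_is_valid_py (value : List (Int × String)) (out : Bool) : Prop := out = is_valid_py_alt value
instance (value : List (Int × String)) (out : Bool) : Decidable (Spec_is_valid_py value out) := by unfold Spec_is_valid_py; infer_instance

-- ===== CLAIM (what is proved, stated in full; the proofs are below) =====
def Claim_equal_is_valid_py : Prop := ∀ (value : List (Int × String)), Dom_is_valid_py value → Pre_is_valid_py value → Spec_is_valid_py value (is_valid_py value)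

-- ===== LEMMAS AND PROOFS =====

-- len(set(xs)) == len(xs) iff xs has no duplicates
lemma length_ofList_eq_iff {α : Type} [BEq α] [LawfulBEq α] (xs : List α) :
    (PySem.Set.ofList xs).length = xs.length ↔ xs.Nodup := by
  induction xs with
  | nil => simp [PySem.Set.ofList_nil]
  | cons x xs ih =>
    rw [PySem.Set.ofList_cons]
    by_cases hx : x ∈ PySem.Set.ofList xs
    · have hlt : ((PySem.Set.ofList xs).discard x).length < (PySem.Set.ofList xs).length := by
        simp only [PySem.Set.discard]
        exact List.length_filter_lt_length_iff_exists.mpr ⟨x, hx, by simp⟩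
      have hmem : x ∈ xs := (PySem.Set.mem_ofList xs x).1 hx
      have hle := PySem.Set.length_ofList_le xs
      simp only [List.length_cons]
      constructor
      · intro h; exfalso; omega
      · intro h; exact absurd hmem (List.nodup_cons.mp h).1
    · have hd : (PySem.Set.ofList xs).discard x = PySem.Set.ofList xs := by
        simp only [PySem.Set.discard]
        apply List.filter_eq_self.mpr
        intro a ha
        have hne : a ≠ x := fun he => hx (he ▸ ha)
        simp [hne]
      rw [hd]
      simp only [List.length_cons, List.nodup_cons]
      constructor
      · intro h
        exact ⟨fun hm => hx ((PySem.Set.mem_ofList xs x).2 hm), ih.1 (by omega)⟩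
      · intro h
        have := ih.2 h.2
        omega

-- B's loop characterised
lemma pvGoB_iff (n : Int) (items : List (Int × String)) (seen : PySem.Set String) :
    pvGoB n items seen = true ↔
      (∀ p ∈ items, 1 ≤ p.1 ∧ p.1 ≤ n) ∧ (items.map Prod.snd).Nodup ∧
      (∀ v ∈ items.map Prod.snd, ¬ v ∈ seen) := by
  induction items generalizing seen with
  | nil => simp [pvGoB]
  | cons p rest ih =>
    obtain ⟨k, v⟩ := p
    simp only [pvGoB]
    split_ifs with h
    · rw [ih]
      obtain ⟨h1, h2, h3⟩ := h
      constructor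
      · rintro ⟨ha, hb, hc⟩
        refine ⟨?_, ?_, ?_⟩
        · intro q hq
          rcases List.mem_cons.mp hq with rfl | hq
          · exact ⟨h1, h2⟩
          · exact ha q hq
        · simp only [List.map_cons, List.nodup_cons]
          exact ⟨fun hm => (hc v hm) (by rw [PySem.Set.mem_add]; right; rfl), hb⟩
        · intro w hw hm
          simp only [List.map_cons, List.mem_cons] at hw
          rcases hw with rfl | hw
          · exact h3 ((PySem.Set.contains_iff seen w).2 hm)
          · exact (hc w hw) (by rw [PySem.Set.mem_add]; left; exact hm)
      · rintro ⟨ha, hb, hc⟩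
        simp only [List.map_cons, List.nodup_cons] at hb
        refine ⟨fun q hq => ha q (List.mem_cons_of_mem _ hq), hb.2, ?_⟩
        intro w hw hm
        rw [PySem.Set.mem_add] at hm
        rcases hm with hm | rfl
        · exact hc w (by simp [List.map_cons, hw]) hm
        · exact hb.1 hw
    · simp only [false_iff]
      rintro ⟨ha, hb, hc⟩
      refine h ⟨(ha (k, v) (by simp)).1, (ha (k, v) (by simp)).2, ?_⟩
      intro hcv
      exact hc v (by simp) ((PySem.Set.contains_iff seen v).1 hcv)

-- a Nodup list of n integers each in [1,n] has exactly the members 1..n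
lemma keys_cover (keys : List Int) (hnd : keys.Nodup)
    (hall : ∀ k ∈ keys, 1 ≤ k ∧ k ≤ (keys.length : Int)) :
    ∀ x : Int, x ∈ keys ↔ 1 ≤ x ∧ x < (keys.length : Int) + 1 := by
  intro x
  constructor
  · intro hx
    have := hall x hx
    omega
  · intro hx
    set rng := PySem.List.pyRange 1 ((keys.length : Int) + 1) 1 with hrng
    have hsub : keys.toFinset ⊆ rng.toFinset := by
      intro y hy
      rw [List.mem_toFinset] at *
      rw [hrng, PySem.List.mem_pyRange_one]
      have := hall y hy
      omega
    have hrnd : rng.Nodup := by rw [hrng]; exact PySem.List.nodup_pyRange_one _ _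
    have hrlen : rng.length = keys.length := by
      rw [hrng, PySem.List.length_pyRange_one]
      omega
    have hcard : rng.toFinset.card ≤ keys.toFinset.card := by
      have h1 : keys.toFinset.card = keys.length := List.toFinset_card_of_nodup hnd
      have h2 : rng.toFinset.card = rng.length := List.toFinset_card_of_nodup hrnd
      omega
    have heq : keys.toFinset = rng.toFinset := Finset.eq_of_subset_of_card_le hsub hcard
    have hxr : x ∈ rng := by rw [hrng, PySem.List.mem_pyRange_one]; omega
    have hxf : x ∈ rng.toFinset := List.mem_toFinset.mpr hxr
    rw [← heq, List.mem_toFinset] at hxf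
    exact hxf

-- ===== VERDICT (by name: the statement is the Claim_ definition above) =====
theorem is_valid_py_spec : Claim_equal_is_valid_py := by
  intro value _ hpre
  unfold Spec_is_valid_py is_valid_py is_valid_py_alt
  by_cases hlen : value.length = 0
  · simp [hlen]
  · simp only [hlen, if_false]
    set keys := value.map Prod.fst with hkeys
    set values := value.map Prod.snd with hvalues
    have hklen : keys.length = value.length := by simp [hkeys]
    have hAiff : (∀ x : Int, x ∈ keys ↔ 1 ≤ x ∧ x < (value.length : Int) + 1) ∧ values.Nodup ↔
        pvGoB (value.length : Int) value PySem.Set.empty = true := by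
      rw [pvGoB_iff]
      constructor
      · rintro ⟨hk, hv⟩
        refine ⟨?_, hv, by simp [PySem.Set.empty]⟩
        intro p hp
        have hpk : p.1 ∈ keys := by rw [hkeys]; exact List.mem_map_of_mem hp
        have := (hk p.1).1 hpk
        omega
      · rintro ⟨hk, hv, _⟩
        refine ⟨?_, hv⟩
        have hall : ∀ k ∈ keys, 1 ≤ k ∧ k ≤ (keys.length : Int) := by
          intro k hkm
          rw [hkeys] at hkm
          obtain ⟨p, hp, rfl⟩ := List.mem_map.mp hkm
          have := hk p hp
          omega
        have hcov := keys_cover keys hpre hall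
        intro x
        rw [hcov x, hklen]
    by_cases hA : (∀ x : Int, x ∈ keys ↔ 1 ≤ x ∧ x < (value.length : Int) + 1) ∧ values.Nodup
    · rw [hAiff.mp hA]
      have hset : PySem.Set.equal (PySem.Set.ofList keys)
          (PySem.Set.ofList (PySem.List.pyRange 1 ((keys.length : Int) + 1) 1)) = true := by
        rw [PySem.Set.equal_iff]
        intro x
        rw [PySem.Set.mem_ofList, PySem.Set.mem_ofList, PySem.List.mem_pyRange_one, hklen]
        exact hA.1 x
      have hvals : (PySem.Set.ofList values).length = values.length :=
        (length_ofList_eq_iff values).mpr hA.2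
      simp [hset, hvals]
    · have hB : pvGoB (value.length : Int) value PySem.Set.empty ≠ true := fun h => hA (hAiff.mpr h)
      rw [Bool.eq_false_iff.mpr hB]
      rw [not_and_or] at hA
      rcases hA with hA | hA
      · have hset : ¬ PySem.Set.equal (PySem.Set.ofList keys)
            (PySem.Set.ofList (PySem.List.pyRange 1 ((keys.length : Int) + 1) 1)) = true := by
          rw [PySem.Set.equal_iff]
          intro h
          apply hA
          intro x
          have hx := h x
          rw [PySem.Set.mem_ofList, PySem.Set.mem_ofList, PySem.List.mem_pyRange_one, hklen] at hx
          exact hx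
        simp [hset]
      · have hvals : (PySem.Set.ofList values).length ≠ values.length :=
          fun h => hA ((length_ofList_eq_iff values).mp h)
        split_ifs <;> simp_all
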